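-- pv_equiv track=rewrite | github.com/gratach/distrida | src/distrida/address_system/weg.py | abschZuInt
-- ===== SOURCE A (Python) =====
-- def abschZuInt(weg):
--     l = len(weg) - 1
--     assert weg[l] == 254
--     i = 0
--     mul = 1
--     ges = 0
--     while i < l:
--         assert weg[i] < 254
--         ges += (weg[i] + 1) * mul
--         mul *= 254
--         i += 1
--     return ges
-- ===== SOURCE B (Python) =====
-- def _digitsValue(digits):
--     # value of a little-endian base-254 digit list, by structural recursion
--     if not digits:
--         return 0
--     d = digits[0]
--     assert d < 254
--     return (d + 1) + 254 * _digitsValue(digits[1:])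
--
--
-- def abschZuInt(weg):
--     l = len(weg) - 1
--     assert weg[l] == 254
--     return _digitsValue(weg[:l])
-- ===== Notes on version B (the rewrite author's own statement) =====
-- stated objective: alternative
-- what changed: Replaces A's indexed while-loop maintaining an explicit power multiplier with a structural recursion on the digit list itself (value(d::rest) = (d+1) + 254*value(rest)), no indices or multiplier kept.
import Mathlib
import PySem

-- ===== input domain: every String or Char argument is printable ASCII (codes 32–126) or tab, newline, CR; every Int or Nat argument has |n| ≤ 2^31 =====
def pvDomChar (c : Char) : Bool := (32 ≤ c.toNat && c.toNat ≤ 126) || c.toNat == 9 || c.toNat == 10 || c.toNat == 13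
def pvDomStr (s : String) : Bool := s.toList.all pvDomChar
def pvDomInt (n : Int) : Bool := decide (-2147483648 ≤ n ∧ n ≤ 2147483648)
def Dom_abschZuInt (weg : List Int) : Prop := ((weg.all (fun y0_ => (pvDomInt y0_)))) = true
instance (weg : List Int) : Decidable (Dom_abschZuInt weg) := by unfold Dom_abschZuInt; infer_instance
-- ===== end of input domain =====

-- B decodes the base-254 digit list by structural recursion on the list
-- (value(d::rest) = (d+1) + 254*value(rest)) instead of A's indexed loop with
-- an explicit power multiplier (objective: alternative decomposition, same cost).

-- ===== PORT A =====
-- A: low-to-high loop over i < l with state (mul, ges); asserts are reflected in Pre_.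
def abschZuInt (weg : List Int) : Int :=
  let l : Nat := weg.length - 1
  ((List.range l).foldl
    (fun (st : Int × Int) i => (st.1 * 254, st.2 + (weg.getD i 0 + 1) * st.1))
    (1, 0)).2

-- ===== PORT B =====
-- B's helper: structural recursion on the digit list.
def pvDigitsValue : List Int → Int
  | [] => 0
  | d :: rest => (d + 1) + 254 * pvDigitsValue rest

-- B: strip the trailing 254 sentinel (weg[:l]) and recurse over the digits.
def abschZuInt_alt (weg : List Int) : Int :=
  pvDigitsValue (weg.take (weg.length - 1))

-- ===== PRECONDITION & SPEC =====
-- Pre_ excludes exactly the inputs where Python A raises: the empty list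
-- (IndexError) and lists whose last element is not 254 or whose earlier
-- elements are not all < 254 (AssertionError).
def Pre_abschZuInt (weg : List Int) : Prop :=
  weg ≠ [] ∧ weg.getLast? = some 254 ∧ ∀ x ∈ weg.dropLast, x < 254
instance (weg : List Int) : Decidable (Pre_abschZuInt weg) := by unfold Pre_abschZuInt; infer_instance
def pvWitness_abschZuInt : List Int := [5, 2, 254]

def Spec_abschZuInt (weg : List Int) (out : Int) : Prop := out = abschZuInt_alt weg
instance (weg : List Int) (out : Int) : Decidable (Spec_abschZuInt weg out) := by unfold Spec_abschZuInt; infer_instance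

-- ===== CLAIM (what is proved, stated in full; the proofs are below) =====
def Claim_equal_abschZuInt : Prop := ∀ (weg : List Int), Dom_abschZuInt weg → Pre_abschZuInt weg → Spec_abschZuInt weg (abschZuInt weg)

-- ===== LEMMAS AND PROOFS =====

-- value of the first l digits, low-to-high (characterises A's accumulator)
def pvVal (weg : List Int) (l : Nat) : Int :=
  ((List.range l).map (fun i => (weg.getD i 0 + 1) * 254 ^ i)).sum

lemma pvVal_succ (weg : List Int) (l : Nat) :
    pvVal weg (l + 1) = pvVal weg l + (weg.getD l 0 + 1) * 254 ^ l := by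
  simp [pvVal, List.range_succ]

lemma stateA (weg : List Int) (l : Nat) :
    (List.range l).foldl
      (fun (st : Int × Int) i => (st.1 * 254, st.2 + (weg.getD i 0 + 1) * st.1))
      (1, 0) = (254 ^ l, pvVal weg l) := by
  induction l with
  | zero => simp [pvVal]
  | succ l ih =>
      rw [List.range_succ, List.foldl_append, ih]
      simp only [List.foldl_cons, List.foldl_nil, pvVal_succ, pow_succ]

lemma pvVal_cons (d : Int) (rest : List Int) (m : Nat) :
    pvVal (d :: rest) (m + 1) = (d + 1) + 254 * pvVal rest m := by
  induction m with
  | zero => simp [pvVal]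
  | succ m ih =>
      rw [pvVal_succ, ih, pvVal_succ]
      simp only [List.getD_cons_succ]
      ring

lemma digitsValue_take (weg : List Int) (l : Nat) :
    pvDigitsValue (weg.take l) = pvVal weg l ∨ weg.length < l := by
  induction weg generalizing l with
  | nil =>
      cases l with
      | zero => left; simp [pvDigitsValue, pvVal]
      | succ l => right; simp
  | cons d rest ih =>
      cases l with
      | zero => left; simp [pvDigitsValue, pvVal]
      | succ m =>
          rcases ih m with h | h
          · left
            simp only [List.take_succ_cons, pvDigitsValue, h, pvVal_cons]
          · right
            simpa using h
-- ===== VERDICT (by name: the statement is the Claim_ definition above) =====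
theorem abschZuInt_spec : Claim_equal_abschZuInt := by
  intro weg _ _
  unfold Spec_abschZuInt abschZuInt abschZuInt_alt
  simp only [stateA]
  rcases digitsValue_take weg (weg.length - 1) with h | h
  · exact h.symm
  · omega
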